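-- pv_equiv track=rewrite | github.com/Vaibhav-api-code/code-intelligence-toolkit | dev/interface_audit_comprehensive.py | _check_standard_pattern
-- ===== SOURCE A (Python) =====
-- from typing import Dict, List, Tuple, Optional
--
-- def _check_standard_pattern(tool_type: str, examples: List[str]) -> bool:
--     """Check if examples follow standard pattern for the tool type"""
--     if not examples:
--         return False
--
--     for example in examples:
--         parts = example.split()
--         if len(parts) < 2:
--             continue
--
--         tool_name = parts[0]
--         args = parts[1:]
--
--         if tool_type == 'search':
--             # Should be: <pattern> --file <file> | --scope <dir>
--             if len(args) >= 1 and ('--file' in args or '--scope' in args):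
--                 return True
--
--         elif tool_type == 'analyze':
--             # Should be: <target> --file <file> | --scope <dir>
--             if len(args) >= 1 and ('--file' in args or '--scope' in args):
--                 return True
--
--         elif tool_type == 'navigate':
--             # Should be: <file> --to <target> | --line <num>
--             if len(args) >= 2 and ('--to' in args or '--line' in args):
--                 return True
--
--         elif tool_type == 'directory':
--             # Should be: <path> [options] (positional path)
--             if len(args) >= 1 and not args[0].startswith('-'):
--                 return True
--
--         elif tool_type == 'compare':
--             # Should be: <file1> <file2> [options]
--             if len(args) >= 2 and not args[0].startswith('-') and not args[1].startswith('-'):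
--                 return True
--
--     return False
-- ===== SOURCE B (Python) =====
-- def _check_standard_pattern(tool_type, examples):
--     """Check if examples follow standard pattern for the tool type"""
--     matched = set()
--     for example in examples:
--         parts = example.split()
--         if len(parts) < 2:
--             continue
--         args = parts[1:]
--         if '--file' in args or '--scope' in args:
--             matched.add('search')
--             matched.add('analyze')
--         if len(args) >= 2 and ('--to' in args or '--line' in args):
--             matched.add('navigate')
--         if not args[0].startswith('-'):
--             matched.add('directory')
--             if len(args) >= 2 and not args[1].startswith('-'):
--                 matched.add('compare')
--     return tool_type in matched
-- ===== Notes on version B (the rewrite author's own statement) =====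
-- stated objective: alternative
-- what changed: B inverts the computation: instead of branching on tool_type inside the scan and early-returning, it runs a type-agnostic loop that classifies each example into the set of all tool types it matches, then answers by a final membership test of tool_type in that set.
import Mathlib
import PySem

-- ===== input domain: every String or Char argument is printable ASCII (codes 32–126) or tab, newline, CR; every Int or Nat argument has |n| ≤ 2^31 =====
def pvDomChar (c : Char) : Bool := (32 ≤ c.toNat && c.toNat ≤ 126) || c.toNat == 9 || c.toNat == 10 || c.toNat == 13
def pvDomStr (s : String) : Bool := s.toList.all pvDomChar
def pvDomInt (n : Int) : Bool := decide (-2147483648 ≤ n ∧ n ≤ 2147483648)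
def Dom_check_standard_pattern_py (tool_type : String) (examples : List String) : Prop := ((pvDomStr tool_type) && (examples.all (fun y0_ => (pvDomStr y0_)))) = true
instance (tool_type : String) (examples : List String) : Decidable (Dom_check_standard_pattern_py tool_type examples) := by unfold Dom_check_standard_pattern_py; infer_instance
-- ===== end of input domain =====

-- B inverts the computation: a type-agnostic loop classifies every example into the set of tool
-- types it matches, and tool_type is looked up in that set at the end; A branches on tool_type
-- inside the scan and early-returns. Objective: alternative decomposition, same cost.

-- ===== PORT A =====
-- A's for-loop, returning true on the first matching example
def checkA_loop (tool_type : String) : List String → Bool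
  | [] => false
  | example_ :: rest =>
    let parts := PySem.Str.split₀ example_
    if parts.length < 2 then checkA_loop tool_type rest
    else
      let args := PySem.List.slice parts (some 1) none
      if tool_type == "search" then
        if decide (1 ≤ args.length) && (args.contains "--file" || args.contains "--scope")
        then true else checkA_loop tool_type rest
      else if tool_type == "analyze" then
        if decide (1 ≤ args.length) && (args.contains "--file" || args.contains "--scope")
        then true else checkA_loop tool_type rest
      else if tool_type == "navigate" then
        if decide (2 ≤ args.length) && (args.contains "--to" || args.contains "--line")
        then true else checkA_loop tool_type rest
      else if tool_type == "directory" then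
        if decide (1 ≤ args.length) && !(PySem.Str.startswith (args.getD 0 "") "-")
        then true else checkA_loop tool_type rest
      else if tool_type == "compare" then
        if decide (2 ≤ args.length) && !(PySem.Str.startswith (args.getD 0 "") "-")
             && !(PySem.Str.startswith (args.getD 1 "") "-")
        then true else checkA_loop tool_type rest
      else checkA_loop tool_type rest

def check_standard_pattern_py (tool_type : String) (examples : List String) : Bool :=
  if examples.isEmpty then false
  else checkA_loop tool_type examples

-- ===== PORT B =====
-- Source B's loop body: add to 'matched' every tool type this example matches
def checkB_step (matched : PySem.Set String) (example_ : String) : PySem.Set String :=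
  let parts := PySem.Str.split₀ example_
  if parts.length < 2 then matched
  else
    let args := PySem.List.slice parts (some 1) none
    let matched :=
      if args.contains "--file" || args.contains "--scope"
      then PySem.Set.add (PySem.Set.add matched "search") "analyze" else matched
    let matched :=
      if decide (2 ≤ args.length) && (args.contains "--to" || args.contains "--line")
      then PySem.Set.add matched "navigate" else matched
    if !(PySem.Str.startswith (args.getD 0 "") "-") then
      let matched := PySem.Set.add matched "directory"
      if decide (2 ≤ args.length) && !(PySem.Str.startswith (args.getD 1 "") "-")
      then PySem.Set.add matched "compare" else matched
    else matched

def check_standard_pattern_py_alt (tool_type : String) (examples : List String) : Bool :=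
  PySem.Set.contains (examples.foldl checkB_step PySem.Set.empty) tool_type

-- ===== PRECONDITION & SPEC =====
def Spec_check_standard_pattern_py (tool_type : String) (examples : List String) (out : Bool) : Prop := out = check_standard_pattern_py_alt tool_type examples
instance (tool_type : String) (examples : List String) (out : Bool) : Decidable (Spec_check_standard_pattern_py tool_type examples out) := by unfold Spec_check_standard_pattern_py; infer_instance

-- ===== CLAIM (what is proved, stated in full; the proofs are below) =====
def Claim_equal_check_standard_pattern_py : Prop := ∀ (tool_type : String) (examples : List String), Dom_check_standard_pattern_py tool_type examples → Spec_check_standard_pattern_py tool_type examples (check_standard_pattern_py tool_type examples)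

-- ===== LEMMAS AND PROOFS =====
-- whether a single example matches tool_type's pattern (the common value of both loops' bodies)
def matchOne (tool_type example_ : String) : Bool :=
  let parts := PySem.Str.split₀ example_
  if parts.length < 2 then false
  else
    let args := PySem.List.slice parts (some 1) none
    if tool_type == "search" || tool_type == "analyze" then
      args.contains "--file" || args.contains "--scope"
    else if tool_type == "navigate" then
      decide (2 ≤ args.length) && (args.contains "--to" || args.contains "--line")
    else if tool_type == "directory" then
      !(PySem.Str.startswith (args.getD 0 "") "-")
    else if tool_type == "compare" then
      decide (2 ≤ args.length) && !(PySem.Str.startswith (args.getD 0 "") "-")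
        && !(PySem.Str.startswith (args.getD 1 "") "-")
    else false

lemma length_args_pos (parts : List String) (h : ¬ parts.length < 2) :
    1 ≤ (PySem.List.slice parts (some 1) none).length := by
  rw [PySem.List.slice_from_one]; simp; omega

lemma checkA_loop_eq_any (tool_type : String) (examples : List String) :
    checkA_loop tool_type examples = examples.any (matchOne tool_type) := by
  induction examples with
  | nil => rfl
  | cons e rest ih =>
    rw [List.any_cons, ← ih, checkA_loop, matchOne]
    by_cases hlen : (PySem.Str.split₀ e).length < 2
    · simp [hlen]
    · have h1 : decide (1 ≤ (PySem.List.slice (PySem.Str.split₀ e) (some 1) none).length) = true := by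
        simpa using length_args_pos _ hlen
      simp only [if_neg hlen, h1, Bool.true_and]
      by_cases t1 : tool_type = "search" <;> by_cases t2 : tool_type = "analyze" <;>
        by_cases t3 : tool_type = "navigate" <;> by_cases t4 : tool_type = "directory" <;>
        by_cases t5 : tool_type = "compare" <;>
        simp_all

lemma contains_add (s : PySem.Set String) (x y : String) :
    PySem.Set.contains (PySem.Set.add s x) y = (PySem.Set.contains s y || y == x) := by
  simp only [PySem.Set.contains_eq_listContains]
  by_cases h : y ∈ PySem.Set.add s x <;> by_cases h2 : y ∈ s <;>
    simp_all [PySem.Set.mem_add]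

set_option maxHeartbeats 1000000 in
lemma contains_step (matched : PySem.Set String) (e tool_type : String) :
    PySem.Set.contains (checkB_step matched e) tool_type =
      (PySem.Set.contains matched tool_type || matchOne tool_type e) := by
  rw [checkB_step, matchOne]
  by_cases hlen : (PySem.Str.split₀ e).length < 2
  · simp [hlen]
  simp only [if_neg hlen]
  by_cases t1 : tool_type = "search"
  · subst t1; split_ifs <;> simp_all [contains_add]
  by_cases t2 : tool_type = "analyze"
  · subst t2; split_ifs <;> simp_all [contains_add]
  by_cases t3 : tool_type = "navigate"
  · subst t3; split_ifs <;> simp_all [contains_add]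
  by_cases t4 : tool_type = "directory"
  · subst t4; split_ifs <;> simp_all [contains_add]
  by_cases t5 : tool_type = "compare"
  · subst t5; split_ifs <;> simp_all [contains_add]
  split_ifs <;> simp_all [contains_add]

lemma contains_foldl (examples : List String) (matched : PySem.Set String) (tool_type : String) :
    PySem.Set.contains (examples.foldl checkB_step matched) tool_type =
      (PySem.Set.contains matched tool_type || examples.any (matchOne tool_type)) := by
  induction examples generalizing matched with
  | nil => simp
  | cons e rest ih => rw [List.foldl_cons, ih, contains_step, Bool.or_assoc, List.any_cons]

-- ===== VERDICT (by name: the statement is the Claim_ definition above) =====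
theorem check_standard_pattern_py_spec : Claim_equal_check_standard_pattern_py := by
  intro tool_type examples _
  unfold Spec_check_standard_pattern_py check_standard_pattern_py check_standard_pattern_py_alt
  rw [contains_foldl, checkA_loop_eq_any]
  cases examples <;> simp [PySem.Set.empty]
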